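-- pv_equiv track=rewrite | github.com/rayz1065/competitive-programming | ois/2024/rectangle/main.py | find_good_sticks
-- ===== SOURCE A (Python) =====
-- def find_good_sticks(frequencies):
--     found = []
--     for stick in sorted(frequencies, key=lambda x: -x):
--         while frequencies[stick] >= 2:
--             frequencies[stick] -= 2
--             found.append(stick)
--
--             if len(found) == 2:
--                 return found
--
--     return [0, 0]
-- ===== SOURCE B (Python) =====
-- def find_good_sticks(frequencies):
--     found = []
--     while len(found) < 2:
--         best = None
--         for stick, count in frequencies.items():
--             if count >= 2 and (best is None or stick > best):
--                 best = stick
--         if best is None: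
--             break
--         frequencies[best] -= 2
--         found.append(best)
--     return found if len(found) == 2 else [0, 0]
-- ===== Notes on version B (the rewrite author's own statement) =====
-- stated objective: faster
-- what changed: Replaces sorting all keys descending with at most two max-scans over the items (only two pairs can ever be taken), keeping the same in-place decrements of frequencies.
import Mathlib
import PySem

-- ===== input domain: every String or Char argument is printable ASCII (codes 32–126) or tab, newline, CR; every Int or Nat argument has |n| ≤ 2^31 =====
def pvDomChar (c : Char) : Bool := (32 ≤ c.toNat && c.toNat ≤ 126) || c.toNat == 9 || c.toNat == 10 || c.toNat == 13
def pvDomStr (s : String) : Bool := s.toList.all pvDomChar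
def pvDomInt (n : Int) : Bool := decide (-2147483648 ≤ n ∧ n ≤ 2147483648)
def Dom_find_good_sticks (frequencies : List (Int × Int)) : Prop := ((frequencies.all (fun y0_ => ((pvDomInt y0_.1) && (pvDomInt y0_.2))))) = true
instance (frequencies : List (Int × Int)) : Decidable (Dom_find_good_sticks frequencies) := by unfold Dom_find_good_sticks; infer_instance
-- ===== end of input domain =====

-- B replaces A's descending sort of the keys by at most two max-scans over the items (only two
-- pairs are ever taken); both mutate `frequencies` identically in Python — the theorem is about
-- the return value.


-- ===== PORT A =====
-- inner `while frequencies[stick] >= 2:` loop; `Sum.inr found` = the `return found` inside it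
def pvAWhile (d : PySem.Dict Int Int) (stick : Int) (found : List Int) :
    (PySem.Dict Int Int × List Int) ⊕ List Int :=
  if _h : 2 ≤ d.getD stick 0 then
    if (found ++ [stick]).length = 2 then Sum.inr (found ++ [stick])
    else pvAWhile (d.modify stick 0 (fun c => c - 2)) stick (found ++ [stick])
  else Sum.inl (d, found)
termination_by (d.getD stick 0).toNat
decreasing_by
  simp only [PySem.Dict.getD_modify_self]
  omega

-- `for stick in sorted(frequencies, key=lambda x: -x):` body
def pvAOuter : List Int → PySem.Dict Int Int → List Int → List Int
  | [], _, _ => [0, 0]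
  | stick :: rest, d, found =>
    match pvAWhile d stick found with
    | Sum.inr res => res
    | Sum.inl (d', found') => pvAOuter rest d' found'

def find_good_sticks (frequencies : List (Int × Int)) : List Int :=
  pvAOuter
    (PySem.List.sorted (PySem.Dict.ofList frequencies).keys (fun x => -x) false)
    (PySem.Dict.ofList frequencies) []

-- ===== PORT B =====
-- body of B's inner `for stick, count in frequencies.items():` max-scan
def pvBStep (best : Option Int) (p : Int × Int) : Option Int :=
  match best with
  | none => if 2 ≤ p.2 then some p.1 else none
  | some b => if 2 ≤ p.2 ∧ b < p.1 then some p.1 else some b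

def pvBScan (items : List (Int × Int)) : Option Int :=
  items.foldl pvBStep none

-- B's `while len(found) < 2:` loop
def pvBLoop (d : PySem.Dict Int Int) (found : List Int) : PySem.Dict Int Int × List Int :=
  if found.length < 2 then
    match pvBScan d.items with
    | none => (d, found)
    | some best => pvBLoop (d.modify best 0 (fun c => c - 2)) (found ++ [best])
  else (d, found)
termination_by 2 - found.length
decreasing_by
  simp only [List.length_append, List.length_cons, List.length_nil]
  omega

def find_good_sticks_alt (frequencies : List (Int × Int)) : List Int :=
  let r := pvBLoop (PySem.Dict.ofList frequencies) []
  if r.2.length = 2 then r.2 else [0, 0]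

-- ===== PRECONDITION & SPEC =====
def Spec_find_good_sticks (frequencies : List (Int × Int)) (out : List Int) : Prop := out = find_good_sticks_alt frequencies
instance (frequencies : List (Int × Int)) (out : List Int) : Decidable (Spec_find_good_sticks frequencies out) := by unfold Spec_find_good_sticks; infer_instance

-- ===== CLAIM (what is proved, stated in full; the proofs are below) =====
def Claim_equal_find_good_sticks : Prop := ∀ (frequencies : List (Int × Int)), Dom_find_good_sticks frequencies → Spec_find_good_sticks frequencies (find_good_sticks frequencies)

-- ===== LEMMAS AND PROOFS =====

-- "stick has a pair left" predicate, shared by the proofs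
def pvQ (d : PySem.Dict Int Int) : Int → Bool := fun k => decide (2 ≤ d.getD k 0)

-- merge of two optional maxima
def pvOmax : Option Int → Option Int → Option Int
  | none, m => m
  | some b, none => some b
  | some b, some m => some (max b m)

lemma pvOmax_assoc (x y z : Option Int) : pvOmax (pvOmax x y) z = pvOmax x (pvOmax y z) := by
  cases x <;> cases y <;> cases z <;> simp [pvOmax, max_assoc]

lemma pvOmax_none_right (x : Option Int) : pvOmax x none = x := by cases x <;> rfl

lemma max?_cons_omax (k : Int) (l : List Int) : (k :: l).max? = pvOmax (some k) l.max? := by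
  cases hm : l.max? with
  | none =>
    rw [List.max?_eq_none_iff] at hm
    subst hm; rfl
  | some m =>
    rw [List.max?_eq_some_iff] at hm
    show (k :: l).max? = some (max k m)
    rw [List.max?_eq_some_iff]
    refine ⟨?_, ?_⟩
    · rcases max_choice k m with h | h <;> rw [h]
      · exact List.mem_cons_self
      · exact List.mem_cons_of_mem _ hm.1
    · intro b hb
      rcases List.mem_cons.1 hb with rfl | hb
      · exact le_max_left _ _
      · exact le_trans (hm.2 b hb) (le_max_right _ _)

lemma max?_perm (l1 l2 : List Int) (h : l1.Perm l2) : l1.max? = l2.max? := by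
  cases h1 : l1.max? with
  | none =>
    rw [List.max?_eq_none_iff] at h1
    subst h1
    have : l2 = [] := h.symm.eq_nil
    simp [this]
  | some a =>
    rw [List.max?_eq_some_iff] at h1
    symm
    rw [List.max?_eq_some_iff]
    exact ⟨h.mem_iff.1 h1.1, fun b hb => h1.2 b (h.mem_iff.2 hb)⟩

lemma desc_max?_eq_head? (l : List Int) (hdesc : l.Pairwise (fun a b => b < a)) :
    l.max? = l.head? := by
  cases l with
  | nil => rfl
  | cons k t =>
    show (k :: t).max? = some k
    rw [List.max?_eq_some_iff]
    refine ⟨List.mem_cons_self, ?_⟩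
    intro b hb
    rcases List.mem_cons.1 hb with rfl | hb
    · exact le_refl _
    · exact le_of_lt ((List.pairwise_cons.1 hdesc).1 b hb)

lemma find?_eq_filter_head? (p : Int → Bool) (l : List Int) :
    l.find? p = (l.filter p).head? := by
  induction l with
  | nil => rfl
  | cons k t ih =>
    by_cases hp : p k
    · rw [List.find?_cons_of_pos hp, List.filter_cons_of_pos hp, List.head?_cons]
    · rw [List.find?_cons_of_neg hp, List.filter_cons_of_neg hp, ih]

-- folding B's scan step over (key, value) pairs computes the max of the qualifying keys
lemma scan_fold (g : Int → Int) (ys : List Int) : ∀ b : Option Int,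
    (ys.map (fun k => (k, g k))).foldl pvBStep b
      = pvOmax b ((ys.filter (fun k => decide (2 ≤ g k))).max?) := by
  induction ys with
  | nil => intro b; simp [pvOmax_none_right]
  | cons k ys ih =>
    intro b
    by_cases hq : 2 ≤ g k
    · have hstep : pvBStep b (k, g k) = pvOmax b (some k) := by
        cases b with
        | none => simp [pvBStep, pvOmax, hq]
        | some b' =>
          simp only [pvBStep, pvOmax, hq, true_and]
          split_ifs with h
          · rw [max_eq_right (le_of_lt h)]
          · rw [max_eq_left (by omega)]
      calc ((k :: ys).map (fun k => (k, g k))).foldl pvBStep b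
          = (ys.map (fun k => (k, g k))).foldl pvBStep (pvBStep b (k, g k)) := by
            rw [List.map_cons, List.foldl_cons]
        _ = pvOmax (pvBStep b (k, g k)) ((ys.filter (fun k => decide (2 ≤ g k))).max?) := ih _
        _ = pvOmax (pvOmax b (some k)) ((ys.filter (fun k => decide (2 ≤ g k))).max?) := by
            rw [hstep]
        _ = pvOmax b (pvOmax (some k) ((ys.filter (fun k => decide (2 ≤ g k))).max?)) :=
            pvOmax_assoc _ _ _
        _ = pvOmax b (((k :: ys).filter (fun k => decide (2 ≤ g k))).max?) := by
            rw [List.filter_cons_of_pos (by simp [hq]), max?_cons_omax]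
    · have hstep : pvBStep b (k, g k) = b := by
        cases b with
        | none => simp [pvBStep, hq]
        | some b' => simp [pvBStep, hq]
      rw [List.map_cons, List.foldl_cons, hstep, ih b,
        List.filter_cons_of_neg (by simp [hq])]

lemma scan_eq (d : PySem.Dict Int Int) (hnd : d.keys.Nodup) :
    pvBScan d.items = (d.keys.filter (pvQ d)).max? := by
  have hitems := PySem.Dict.items_eq_map_keys d hnd 0
  rw [pvBScan, hitems, scan_fold (fun k => d.getD k 0) d.keys none]
  rfl

-- B's scan = `find?` over any strictly descending enumeration of the keys
lemma scan_eq_find? (d : PySem.Dict Int Int) (ks : List Int)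
    (hperm : ks.Perm d.keys) (hdesc : ks.Pairwise (fun a b => b < a))
    (hnd : d.keys.Nodup) :
    pvBScan d.items = ks.find? (pvQ d) := by
  rw [scan_eq d hnd, find?_eq_filter_head?,
    ← desc_max?_eq_head? _ (hdesc.filter (pvQ d)),
    max?_perm _ _ (hperm.filter (pvQ d))]

-- A skips any prefix of sticks with no pair left
lemma pvAOuter_prefix (pre : List Int) (ks' : List Int) (d : PySem.Dict Int Int)
    (found : List Int) (h : ∀ k ∈ pre, ¬ 2 ≤ d.getD k 0) :
    pvAOuter (pre ++ ks') d found = pvAOuter ks' d found := by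
  induction pre with
  | nil => rfl
  | cons k pre ih =>
    have hk : ¬ 2 ≤ d.getD k 0 := h k (List.mem_cons_self)
    rw [List.cons_append, pvAOuter, pvAWhile]
    simp only [hk, dite_false]
    exact ih (fun a ha => h a (List.mem_cons_of_mem _ ha))

-- A with one stick already found returns [k0, first remaining qualifier]
lemma pvAOuter_one (rest : List Int) (d : PySem.Dict Int Int) (k0 : Int) :
    pvAOuter rest d [k0]
      = match rest.find? (pvQ d) with
        | none => [0, 0]
        | some k2 => [k0, k2] := by
  induction rest generalizing d with
  | nil => rfl
  | cons k r ih =>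
    by_cases hq : 2 ≤ d.getD k 0
    · rw [pvAOuter, pvAWhile]
      simp [hq, pvQ]
    · rw [pvAOuter, pvAWhile]
      simp only [hq, dite_false]
      rw [ih d]
      simp [pvQ, hq]

lemma pvBLoop_stop (d : PySem.Dict Int Int) (found : List Int) (h : ¬ found.length < 2) :
    pvBLoop d found = (d, found) := by
  rw [pvBLoop]; simp [h]

lemma pvBLoop_go (d : PySem.Dict Int Int) (found : List Int) (h : found.length < 2) :
    pvBLoop d found
      = match pvBScan d.items with
        | none => (d, found)
        | some best => pvBLoop (d.modify best 0 (fun c => c - 2)) (found ++ [best]) := by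
  rw [pvBLoop]; simp [h]

lemma main_eq (f : List (Int × Int)) : find_good_sticks f = find_good_sticks_alt f := by
  rw [find_good_sticks, find_good_sticks_alt]
  set d := PySem.Dict.ofList f with hd
  set ks := PySem.List.sorted d.keys (fun x => -x) false with hks
  have hnd : d.keys.Nodup := PySem.Dict.nodup_keys_ofList f
  have hperm : ks.Perm d.keys := PySem.List.sorted_perm d.keys (fun x => -x) false
  have hks_nd : ks.Nodup := hperm.nodup_iff.2 hnd
  have hdesc0 : ks.Pairwise (fun a b => (fun x : Int => -x) a ≤ (fun x : Int => -x) b) :=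
    PySem.List.sorted_pairwise d.keys (fun x => -x)
  have hdesc : ks.Pairwise (fun a b : Int => b < a) := by
    have hand := List.Pairwise.and hdesc0 hks_nd
    exact hand.imp (fun {a b} hab => by
      obtain ⟨h1, h2⟩ := hab
      simp only at h1
      omega)
  cases h1 : ks.find? (pvQ d) with
  | none =>
    -- no stick has a pair: both return [0,0], the dict unchanged
    have hnone : ∀ k ∈ ks, ¬ 2 ≤ d.getD k 0 := by
      intro k hk
      have := List.find?_eq_none.1 h1 k hk
      simpa [pvQ] using this
    have hA : pvAOuter ks d [] = [0, 0] := by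
      have := pvAOuter_prefix ks [] d [] hnone
      simpa using this
    have hscan : pvBScan d.items = none := by
      rw [scan_eq_find? d ks hperm hdesc hnd, h1]
    rw [hA, pvBLoop_go _ _ (by simp)]
    simp [hscan]
  | some k1 =>
    obtain ⟨hq1, pre, rest, hsplit, hpre⟩ := List.find?_eq_some_iff_append.1 h1
    have hq1' : 2 ≤ d.getD k1 0 := by simpa [pvQ] using hq1
    have hpre' : ∀ k ∈ pre, ¬ 2 ≤ d.getD k 0 := by
      intro k hk
      have := hpre k hk
      simpa [pvQ] using this
    have hnodup_split : k1 ∉ pre ∧ k1 ∉ rest := by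
      have := hks_nd
      rw [hsplit] at this
      simp only [List.nodup_append, List.nodup_cons] at this
      refine ⟨fun hmem => this.2.2 k1 hmem k1 List.mem_cons_self rfl, this.2.1.1⟩
    set d1 := d.modify k1 0 (fun c => c - 2) with hd1
    have hk1keys : k1 ∈ d.keys := hperm.mem_iff.1 (List.mem_of_find?_eq_some h1)
    have hd1keys : d1.keys = d.keys := by
      rw [hd1, PySem.Dict.keys_modify, PySem.Dict.keys_insert_of_contains]
      exact (PySem.Dict.contains_iff_mem_keys _ _).2 hk1keys
    have hd1nd : d1.keys.Nodup := hd1keys ▸ hnd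
    have hd1perm : ks.Perm d1.keys := hd1keys ▸ hperm
    have hget_self : d1.getD k1 0 = d.getD k1 0 - 2 := PySem.Dict.getD_modify_self d k1 0 _
    have hget_ne : ∀ k : Int, k ≠ k1 → d1.getD k 0 = d.getD k 0 := by
      intro k hk
      rw [hd1, PySem.Dict.getD_modify]
      simp [hk]
    have hpre1 : (pre.find? (pvQ d1)) = none := by
      rw [List.find?_eq_none]
      intro k hk
      have hne : k ≠ k1 := fun h => hnodup_split.1 (h ▸ hk)
      simp [pvQ, hget_ne k hne, hpre' k hk]
    -- A reaches k1 directly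
    have hAskip : pvAOuter ks d [] = pvAOuter (k1 :: rest) d [] := by
      rw [hsplit]; exact pvAOuter_prefix pre _ d [] hpre'
    have hscan1 : pvBScan d.items = some k1 := by
      rw [scan_eq_find? d ks hperm hdesc hnd, h1]
    by_cases h4 : 4 ≤ d.getD k1 0
    · -- two pairs of k1: both return [k1, k1]
      have hq14 : 2 ≤ d1.getD k1 0 := by omega
      have hA : pvAOuter ks d [] = [k1, k1] := by
        rw [hAskip, pvAOuter, pvAWhile]
        simp only [hq1', dite_true, List.nil_append, List.length_cons, List.length_nil]
        rw [pvAWhile]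
        have h2' : (2:Int) ≤ d.getD k1 0 - 2 := by omega
        simp [h2']
      have hscan2 : pvBScan d1.items = some k1 := by
        rw [scan_eq_find? d1 ks hd1perm hdesc hd1nd, hsplit, List.find?_append, hpre1]
        simp [pvQ, hq14]
      rw [hA, pvBLoop_go _ _ (by simp)]
      simp only [hscan1, List.nil_append]
      rw [pvBLoop_go _ _ (by simp), ← hd1]
      simp only [hscan2]
      rw [pvBLoop_stop _ _ (by simp)]
      simp
    · -- one pair of k1: second pick is the first qualifier of the rest (or none)
      have hq1no : ¬ 2 ≤ d1.getD k1 0 := by omega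
      have hfind1 : ks.find? (pvQ d1) = rest.find? (pvQ d1) := by
        rw [hsplit, List.find?_append, hpre1]
        simp [pvQ, hq1no]
      have hA : pvAOuter ks d []
          = match rest.find? (pvQ d1) with
            | none => [0, 0]
            | some k2 => [k1, k2] := by
        rw [hAskip, pvAOuter, pvAWhile]
        simp only [hq1', dite_true, List.nil_append, List.length_cons, List.length_nil]
        rw [pvAWhile]
        have h2' : ¬ (2:Int) ≤ d.getD k1 0 - 2 := by omega
        simp only [PySem.Dict.getD_modify_self, h2', dite_false]
        exact pvAOuter_one rest d1 k1
      have hscan2 : pvBScan d1.items = rest.find? (pvQ d1) := by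
        rw [scan_eq_find? d1 ks hd1perm hdesc hd1nd, hfind1]
      rw [hA, pvBLoop_go _ _ (by simp)]
      simp only [hscan1, List.nil_append]
      rw [pvBLoop_go _ _ (by simp), ← hd1]
      simp only [hscan2]
      cases h2 : rest.find? (pvQ d1) with
      | none => simp
      | some k2 =>
        simp only []
        rw [pvBLoop_stop _ _ (by simp)]
        simp

-- ===== VERDICT (by name: the statement is the Claim_ definition above) =====
theorem find_good_sticks_spec : Claim_equal_find_good_sticks := by
  intro f _
  unfold Spec_find_good_sticks
  exact main_eq f
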